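-- pv_equiv track=rewrite | github.com/ThomasHoek/AdventsOfCode | 2023/day 07/day7.2.py | to_hex_code
-- ===== SOURCE A (Python) =====
-- from collections import Counter
--
-- def to_hex_code(inp_str: str):
--     c_dict: dict[str, int] = {
--         "A": 14,
--         "K": 13,
--         "Q": 12,
--         "T": 10,
--         "9": 9,
--         "8": 8,
--         "7": 7,
--         "6": 6,
--         "5": 5,
--         "4": 4,
--         "3": 3,
--         "2": 2,
--         "J": 1,
--     }
--
--     #                 5K, 4K, FH,  3K,  2P, 1P, HC
--     #                  0, 1,   2,  3,   4,  5,  6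
--     rank: list[int] = [0, 0, 0, 0, 0, 0, 0]
--     inp_lst = list(inp_str)
--
--     count_inp = Counter(inp_lst)
--
--     # replace J with most occuring
--     if "J" in inp_str:
--         # get top 2, incase most occuring is J
--         top_j_replace: list[tuple[str, int]] = count_inp.most_common(2)
--
--         if len(top_j_replace) > 1:  # to prevent a pure "JJJJJ"
--             replace_j = top_j_replace[0][0] if top_j_replace[0][0] != "J" else top_j_replace[1][0]
--
--             # replace with most occuring
--             if "J" in inp_lst:
--                 j_str: list[str] = [replace_j if x == "J" else x for x in inp_lst]
--                 count_inp = Counter(j_str)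
--
--     # set bool vars
--     if len(count_inp) == 1:  # 5k
--         rank[0] = 1
--     elif len(count_inp) == 2:  # 4k | FH
--         top_2 = count_inp.most_common(2)
--         if top_2[0][1] == 4:  # 4K
--             rank[1] = 1
--
--         elif top_2[0][1] == 3:  # FH
--             rank[2] = 1
--         else:
--             assert NotImplementedError("impossible")
--
--     elif len(count_inp) == 3:  # 3k | 2P
--         top_3 = count_inp.most_common(3)
--         if top_3[0][1] == 3:  # 3K
--             rank[3] = 1
--
--         elif top_3[0][1] == 2 and top_3[1][1] == 2:  # 2P
--             rank[4] = 1
--         else: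
--             assert NotImplementedError("impossible")
--
--     elif len(count_inp) == 4:  # 1P
--         top_2 = count_inp.most_common(2)
--         rank[5] = 1
--
--     elif len(count_inp) == 5:  # HC
--         rank[6] = 1
--
--     else:
--         assert NotImplementedError("impossible")
--
--     for inp in inp_lst:
--         rank.append(c_dict[inp])
--
--     final_code = 0
--     for counter, cycle_code in enumerate(iterable=rank, start=1):
--         final_code = final_code + (cycle_code * (16 ** (len(rank) - counter)))
--
--     return final_code
-- ===== SOURCE B (Python) =====
-- from collections import Counter
--
-- def to_hex_code(inp_str: str):
--     c_dict: dict[str, int] = {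
--         "A": 14, "K": 13, "Q": 12, "T": 10, "9": 9, "8": 8,
--         "7": 7, "6": 6, "5": 5, "4": 4, "3": 3, "2": 2, "J": 1,
--     }
--
--     # jokers counted apart; the rest classified by its sorted count signature
--     jokers = inp_str.count("J")
--     counts = Counter(c for c in inp_str if c != "J")
--     sig = sorted(counts.values(), reverse=True)
--     if sig:
--         sig[0] += jokers          # jokers join the largest group
--     elif jokers:
--         sig = [jokers]            # all-joker hand
--
--     # hand-type index from the signature (generic in the hand size)
--     if len(sig) == 1:
--         t = 0                     # five of a kind
--     elif len(sig) == 2 and sig[0] == 4: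
--         t = 1                     # four of a kind
--     elif len(sig) == 2 and sig[0] == 3:
--         t = 2                     # full house
--     elif len(sig) == 3 and sig[0] == 3:
--         t = 3                     # three of a kind
--     elif len(sig) == 3 and sig[0] == 2 and sig[1] == 2:
--         t = 4                     # two pair
--     elif len(sig) == 4:
--         t = 5                     # one pair
--     elif len(sig) == 5:
--         t = 6                     # high card
--     else:
--         t = None                  # no recognised hand type
--
--     n = len(inp_str)
--     total = 16 ** (n + 6 - t) if t is not None else 0
--     return total + sum(c_dict[ch] * 16 ** (n - 1 - i) for i, ch in enumerate(inp_str))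
-- ===== Notes on version B (the rewrite author's own statement) =====
-- stated objective: simpler
-- what changed: Replaces the J-substitution-and-recount plus len(counter)-branching and the one-hot rank list with its positional accumulation loop by a sorted count signature (jokers counted apart and merged into the largest group) mapped straight to a type index, with the score computed directly as 16**(n+6-type_index) plus the positional card digits.
import Mathlib
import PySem

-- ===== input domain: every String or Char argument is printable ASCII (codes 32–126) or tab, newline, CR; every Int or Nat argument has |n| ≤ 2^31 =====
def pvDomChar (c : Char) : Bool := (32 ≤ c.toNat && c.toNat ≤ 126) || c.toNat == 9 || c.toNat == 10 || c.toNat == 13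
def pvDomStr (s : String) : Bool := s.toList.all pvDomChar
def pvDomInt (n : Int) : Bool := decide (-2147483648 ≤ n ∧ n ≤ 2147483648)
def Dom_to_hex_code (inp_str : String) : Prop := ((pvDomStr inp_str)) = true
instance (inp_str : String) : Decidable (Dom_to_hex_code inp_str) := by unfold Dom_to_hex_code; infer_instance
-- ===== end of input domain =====

-- B replaces A's J-substitution + len(counter) branching + one-hot/positional loop by a
-- sorted count signature mapped straight to a type index and a direct power-of-16 sum (objective: simpler).

-- ===== PORT A =====

-- the card-value dict shared verbatim by both Pythons
def pvCDict : PySem.Dict Char Int :=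
  PySem.Dict.ofList [('A',14),('K',13),('Q',12),('T',10),('9',9),('8',8),('7',7),
                     ('6',6),('5',5),('4',4),('3',3),('2',2),('J',1)]

-- A's "replace J with most occurring" block: the counter actually classified
def pvCounter2 (inp_lst : List Char) : PySem.Dict Char Int :=
  let count_inp := PySem.Dict.counter inp_lst
  if 'J' ∈ inp_lst then
    let top_j_replace := (PySem.List.sorted count_inp.items (fun p => p.2) true).take 2
    if top_j_replace.length > 1 then
      let replace_j :=
        if (top_j_replace.headD ('J', 0)).1 ≠ 'J' then (top_j_replace.headD ('J', 0)).1
        else (top_j_replace.tail.headD ('J', 0)).1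
      if 'J' ∈ inp_lst then
        PySem.Dict.counter (inp_lst.map (fun x => if x = 'J' then replace_j else x))
      else count_inp
    else count_inp
  else count_inp

-- A's rank one-hot block ("set bool vars"): branch on len(count_inp) and most_common values
def pvRankA (count_inp : PySem.Dict Char Int) : List Int :=
  if count_inp.size = 1 then [1,0,0,0,0,0,0]
  else if count_inp.size = 2 then
    let top_2 := (PySem.List.sorted count_inp.items (fun p => p.2) true).take 2
    if (top_2.headD ('J',0)).2 = 4 then [0,1,0,0,0,0,0]
    else if (top_2.headD ('J',0)).2 = 3 then [0,0,1,0,0,0,0]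
    else [0,0,0,0,0,0,0]        -- Python: assert NotImplementedError(...) is a no-op
  else if count_inp.size = 3 then
    let top_3 := (PySem.List.sorted count_inp.items (fun p => p.2) true).take 3
    if (top_3.headD ('J',0)).2 = 3 then [0,0,0,1,0,0,0]
    else if (top_3.headD ('J',0)).2 = 2 ∧ (top_3.tail.headD ('J',0)).2 = 2 then [0,0,0,0,1,0,0]
    else [0,0,0,0,0,0,0]
  else if count_inp.size = 4 then [0,0,0,0,0,1,0]
  else if count_inp.size = 5 then [0,0,0,0,0,0,1]
  else [0,0,0,0,0,0,0]

def to_hex_code (inp_str : String) : Int :=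
  let inp_lst := inp_str.toList
  let count_inp := pvCounter2 inp_lst
  let rank := pvRankA count_inp ++ inp_lst.map (fun c => pvCDict.getD c 0)  -- c_dict[inp]; KeyError outside Pre_
  (PySem.List.enumerate rank 1).foldl
    (fun final p => final + p.2 * 16 ^ ((rank.length : Int) - p.1).toNat) 0

-- ===== PORT B =====

def pvTypeIndex (sig : List Int) : Option Nat :=
  if sig.length = 1 then some 0                                    -- five of a kind
  else if sig.length = 2 ∧ sig.headD 0 = 4 then some 1             -- four of a kind
  else if sig.length = 2 ∧ sig.headD 0 = 3 then some 2             -- full house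
  else if sig.length = 3 ∧ sig.headD 0 = 3 then some 3             -- three of a kind
  else if sig.length = 3 ∧ sig.headD 0 = 2 ∧ sig.tail.headD 0 = 2 then some 4  -- two pair
  else if sig.length = 4 then some 5                               -- one pair
  else if sig.length = 5 then some 6                               -- high card
  else none                                                        -- no recognised hand type

def to_hex_code_alt (inp_str : String) : Int :=
  let jokers : Int := inp_str.toList.count 'J'
  let counts := PySem.Dict.counter (inp_str.toList.filter (fun c => c ≠ 'J'))
  let sig : List Int :=
    match PySem.List.sorted counts.values (fun v => v) true with
    | [] => if jokers ≠ 0 then [jokers] else []   -- all-joker (or empty) hand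
    | h :: t => (h + jokers) :: t                 -- jokers join the largest group
  let t := pvTypeIndex sig
  let n := inp_str.toList.length
  let total : Int := match t with
    | some t => 16 ^ (n + 6 - t)
    | none => 0
  total + (PySem.List.enumerate inp_str.toList 0).foldl
      (fun acc p => acc + pvCDict.getD p.2 0 * 16 ^ (((n : Int) - 1) - p.1).toNat) 0

-- ===== PRECONDITION & SPEC =====
-- Pre_ excludes exactly the strings containing a character outside the 13 card
-- symbols: on those A raises KeyError (c_dict[inp]).
def Pre_to_hex_code (inp_str : String) : Prop :=
  (inp_str.toList.all
    (fun c => ['A','K','Q','T','9','8','7','6','5','4','3','2','J'].contains c)) = true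
instance (inp_str : String) : Decidable (Pre_to_hex_code inp_str) := by
  unfold Pre_to_hex_code; infer_instance

def pvWitness_to_hex_code : String := "AAKQJ"

def Spec_to_hex_code (inp_str : String) (out : Int) : Prop := out = to_hex_code_alt inp_str
instance (inp_str : String) (out : Int) : Decidable (Spec_to_hex_code inp_str out) := by
  unfold Spec_to_hex_code; infer_instance

-- ===== CLAIM (what is proved, stated in full; the proofs are below) =====
def Claim_equal_to_hex_code : Prop := ∀ (inp_str : String), Dom_to_hex_code inp_str → Pre_to_hex_code inp_str → Spec_to_hex_code inp_str (to_hex_code inp_str)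

-- ===== LEMMAS AND PROOFS =====

-- A's signature: the descending count multiset of the counter A classifies
def pvSigA (L : List Char) : List Int :=
  PySem.List.sorted (pvCounter2 L).values (fun v => v) true

-- uniqueness of the reverse-sorted arrangement of an Int multiset
theorem pv_sorted_rev_unique {xs ys : List Int} (hp : ys.Perm xs)
    (hs : ys.Pairwise (fun a b => b ≤ a)) :
    PySem.List.sorted xs (fun v => v) true = ys := by
  apply PySem.List.eq_of_perm_of_pairwise_le_of_injective (key := fun v : Int => -v) neg_injective
  · exact (PySem.List.sorted_perm xs _ true).trans hp.symm
  · have := PySem.List.sorted_pairwise_rev xs (fun v : Int => v)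
    simpa using this
  · simpa using hs

-- values of a counter, explicitly
theorem pv_values_counter (xs : List Char) :
    (PySem.Dict.counter xs).values =
      (PySem.List.dedup xs).map (fun c => (xs.count c : Int)) := by
  show (PySem.Dict.counter xs).items.map (·.2) = _
  rw [PySem.Dict.items_counter]
  simp [List.map_map, Function.comp]

-- projecting the count-sorted items of a dict gives the sorted values
theorem pv_map_snd_sorted_items (d : PySem.Dict Char Int) :
    (PySem.List.sorted d.items (fun p => p.2) true).map (fun p => p.2) =
      PySem.List.sorted d.values (fun v => v) true := by
  symm
  apply pv_sorted_rev_unique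
  · exact ((PySem.List.sorted_perm d.items _ true).map _)
  · have := PySem.List.sorted_pairwise_rev d.items (fun p : Char × Int => p.2)
    exact List.Pairwise.map _ (fun a b h => h) this

theorem pv_count_replace (L : List Char) (r : Char) (hr : r ≠ 'J') (c : Char) :
    (L.map (fun x => if x = 'J' then r else x)).count c =
      if c = 'J' then 0 else if c = r then L.count r + L.count 'J' else L.count c := by
  induction L with
  | nil => split_ifs <;> simp
  | cons x t ih =>
    simp only [List.map_cons, List.count_cons, ih]
    split_ifs <;> simp_all <;> (try omega) <;>
      first
        | exact absurd (‹('J':Char) = r›.symm) hr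
        | exact absurd (‹('J':Char) = c›.symm) ‹¬ (c = 'J')›

-- every branch of A's J-replacement block is the counter of a list of the hand's length
theorem pv_dedup_all_J (L : List Char) (hJ : 'J' ∈ L) (hall : ∀ c ∈ L, c = 'J') :
    PySem.List.dedup L = ['J'] := by
  have hnd := PySem.List.nodup_dedup L
  have hmemJ : 'J' ∈ PySem.List.dedup L := (PySem.List.mem_dedup L 'J').mpr hJ
  have hallD : ∀ c ∈ PySem.List.dedup L, c = 'J' :=
    fun c hc => hall c ((PySem.List.mem_dedup L c).mp hc)
  rcases hdl : PySem.List.dedup L with _ | ⟨a, _ | ⟨b, tl⟩⟩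
  · rw [hdl] at hmemJ; simp at hmemJ
  · rw [hdl] at hallD; simp_all
  · rw [hdl] at hallD hnd
    have ha := hallD a (by simp)
    have hb := hallD b (by simp)
    subst ha; subst hb
    simp at hnd

theorem pv_sig_eq (L : List Char) :
    (match PySem.List.sorted
        (PySem.Dict.counter (L.filter (fun c => c ≠ 'J'))).values (fun v => v) true with
      | [] => if (L.count 'J' : Int) ≠ 0 then [(L.count 'J' : Int)] else []
      | h :: t => (h + (L.count 'J' : Int)) :: t)
    = pvSigA L := by
  by_cases hJ : 'J' ∈ L
  case neg =>
    have hcnt0 : L.count 'J' = 0 := List.count_eq_zero.mpr hJ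
    have hfilter : L.filter (fun c => c ≠ 'J') = L :=
      List.filter_eq_self.mpr (fun a ha => decide_eq_true (by rintro rfl; exact hJ ha))
    have hc2 : pvCounter2 L = PySem.Dict.counter L := by
      unfold pvCounter2; dsimp only; rw [if_neg hJ]
    rw [hfilter]
    unfold pvSigA
    rw [hc2]
    rcases hs : PySem.List.sorted (PySem.Dict.counter L).values (fun v => v) true with _ | ⟨h, t⟩
    · simp [hcnt0]
    · simp [hcnt0]
  case pos =>
    by_cases hall : ∀ c ∈ L, c = 'J'
    · -- the pure-JJJJJ hand: A never substitutes, B's signature is the bare joker count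
      have hF : L.filter (fun c => c ≠ 'J') = [] :=
        List.filter_eq_nil_iff.mpr (fun a ha => by simp [hall a ha])
      have hdl : PySem.List.dedup L = ['J'] := pv_dedup_all_J L hJ hall
      have hitems : (PySem.Dict.counter L).items = [('J', (L.count 'J' : Int))] := by
        rw [PySem.Dict.items_counter, ← PySem.List.dedup_eq_ofList, hdl]; rfl
      have hsorted1 : PySem.List.sorted (PySem.Dict.counter L).items (fun p => p.2) true
          = [('J', (L.count 'J' : Int))] :=
        List.perm_singleton.mp (hitems ▸ PySem.List.sorted_perm _ _ _)
      have hc2 : pvCounter2 L = PySem.Dict.counter L := by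
        unfold pvCounter2; dsimp only
        rw [if_pos hJ, hsorted1]
        norm_num
      have hvals : (PySem.Dict.counter L).values = [(L.count 'J' : Int)] := by
        rw [pv_values_counter, hdl]; rfl
      have hsortv : PySem.List.sorted (PySem.Dict.counter L).values (fun v => v) true
          = [(L.count 'J' : Int)] := by
        rw [hvals]; exact List.perm_singleton.mp (PySem.List.sorted_perm _ _ _)
      have hscrut : PySem.List.sorted
          (PySem.Dict.counter (L.filter (fun c => c ≠ 'J'))).values (fun v => v) true = [] := by
        rw [hF]
        exact (PySem.List.sorted_eq_nil_iff _ _ _).mpr (by rw [pv_values_counter]; rfl)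
      have hcntpos : ((L.count 'J' : Int)) ≠ 0 := by
        have := List.count_pos_iff.mpr hJ
        omega
      rw [hscrut]
      show (if (L.count 'J' : Int) ≠ 0 then [(L.count 'J' : Int)] else []) = pvSigA L
      rw [if_pos hcntpos]
      unfold pvSigA
      rw [hc2, hsortv]
    · -- the real case: some non-joker card exists, A substitutes 'J' by the most common card
      push Not at hall
      obtain ⟨c0, hc0L, hc0⟩ := hall
      have hJd : 'J' ∈ PySem.List.dedup L := (PySem.List.mem_dedup _ _).mpr hJ
      have hc0d : c0 ∈ PySem.List.dedup L := (PySem.List.mem_dedup _ _).mpr hc0L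
      have hdl2 : 2 ≤ (PySem.List.dedup L).length := by
        rcases hdl : PySem.List.dedup L with _ | ⟨a, _ | ⟨b, tl⟩⟩
        · rw [hdl] at hJd; simp at hJd
        · exfalso; rw [hdl] at hJd hc0d; simp at hJd hc0d
          exact hc0 (hc0d.trans hJd.symm)
        · simp
      set d1 := PySem.Dict.counter L with hd1
      have hitems : d1.items = (PySem.List.dedup L).map (fun k => (k, (L.count k : Int))) := by
        rw [hd1, PySem.Dict.items_counter, ← PySem.List.dedup_eq_ofList]
      have hslen2 : 2 ≤ (PySem.List.sorted d1.items (fun p => p.2) true).length := by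
        rw [PySem.List.length_sorted, hitems, List.length_map]; exact hdl2
      obtain ⟨p0, p1, rest, hs⟩ : ∃ p0 p1 rest,
          PySem.List.sorted d1.items (fun p => p.2) true = p0 :: p1 :: rest := by
        rcases hsx : PySem.List.sorted d1.items (fun p => p.2) true with _ | ⟨q0, _ | ⟨q1, rest⟩⟩
        · rw [hsx] at hslen2; simp at hslen2
        · rw [hsx] at hslen2; simp at hslen2
        · exact ⟨_, _, _, rfl⟩
      set r := if p0.1 ≠ 'J' then p0.1 else p1.1 with hrdef
      have hmem_s : ∀ p ∈ PySem.List.sorted d1.items (fun p => p.2) true,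
          p.1 ∈ PySem.List.dedup L ∧ p.2 = (L.count p.1 : Int) := by
        intro p hp
        rw [PySem.List.mem_sorted, hitems] at hp
        obtain ⟨k, hk, rfl⟩ := List.mem_map.mp hp
        exact ⟨hk, rfl⟩
      have hp0 := hmem_s p0 (by rw [hs]; simp)
      have hp1 := hmem_s p1 (by rw [hs]; simp)
      have hfst_nodup : ((PySem.List.sorted d1.items (fun p => p.2) true).map
          (fun p => p.1)).Nodup := by
        have hperm := (PySem.List.sorted_perm d1.items (fun p => p.2) true).map (fun p => p.1)
        refine hperm.nodup_iff.mpr ?_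
        rw [hitems, List.map_map]
        have : ((fun p : Char × Int => p.1) ∘ fun k => (k, (L.count k : Int))) = fun k => k := rfl
        rw [this, List.map_id']
        rw [PySem.List.dedup_eq_ofList] at *
        exact PySem.List.dedup_eq_ofList L ▸ PySem.List.nodup_dedup L
      have hne01 : p0.1 ≠ p1.1 := by
        rw [hs] at hfst_nodup
        simp only [List.map_cons, List.nodup_cons, List.mem_cons] at hfst_nodup
        exact fun h => hfst_nodup.1 (Or.inl h)
      have hr_ne : r ≠ 'J' := by
        rw [hrdef]; split_ifs with h
        · exact h
        · push Not at h
          exact fun hh => hne01 (h.trans hh.symm)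
      have hr_mem : r ∈ PySem.List.dedup L := by
        rw [hrdef]; split_ifs; exacts [hp0.1, hp1.1]
      have hr_max : ∀ c ∈ PySem.List.dedup L, c ≠ 'J' → (L.count c : Int) ≤ (L.count r : Int) := by
        intro c hc hcne
        have hcsI : (c, (L.count c : Int)) ∈ d1.items := by
          rw [hitems]; exact List.mem_map.mpr ⟨c, hc, rfl⟩
        have hcs : (c, (L.count c : Int)) ∈ PySem.List.sorted d1.items (fun p => p.2) true :=
          (PySem.List.mem_sorted _ _ _ _).mpr hcsI
        have hrcount : (L.count r : Int) = (if p0.1 ≠ 'J' then p0.2 else p1.2) := by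
          rw [hrdef]; split_ifs
          · exact hp0.2.symm
          · exact hp1.2.symm
        rw [hrcount]
        split_ifs with hne
        · exact PySem.List.key_head_sorted_rev_ge _ _ hs _ hcsI
        · push Not at hne
          have hpair := PySem.List.sorted_pairwise_rev d1.items (fun p => p.2)
          rw [hs] at hpair
          rw [hs] at hcs
          rcases List.mem_cons.mp hcs with heq | hcs'
          · exfalso
            have : c = p0.1 := by rw [← heq]
            exact hcne (this.trans hne)
          rcases List.mem_cons.mp hcs' with heq | hrest
          · rw [← heq]
          · have h2 := (List.pairwise_cons.mp hpair).2
            have h3 := (List.pairwise_cons.mp h2).1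
            exact h3 _ hrest
      have hrL : r ∈ L := (PySem.List.mem_dedup _ _).mp hr_mem
      -- A's counter after substitution
      have hc2 : pvCounter2 L =
          PySem.Dict.counter (L.map (fun x => if x = 'J' then r else x)) := by
        unfold pvCounter2
        dsimp only
        rw [← hd1, if_pos hJ, hs]
        simp only [List.take_succ_cons, List.take_zero, List.length_cons, List.headD_cons,
          List.tail_cons]
        rw [if_pos (by omega : ([] : List (Char × Int)).length + 1 + 1 > 1), if_pos hJ, ← hrdef]
      -- the filtered hand
      have hcF : ∀ c : Char, c ≠ 'J' →
          (L.filter (fun c => c ≠ 'J')).count c = L.count c := by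
        intro c hc
        exact List.count_filter (by simp [hc])
      have hmemF : ∀ x, x ∈ L.filter (fun c => c ≠ 'J') ↔ x ∈ L ∧ x ≠ 'J' := by
        intro x; rw [List.mem_filter]; simp
      have hrF : r ∈ L.filter (fun c => c ≠ 'J') := (hmemF r).mpr ⟨hrL, hr_ne⟩
      have hrdF : r ∈ PySem.List.dedup (L.filter (fun c => c ≠ 'J')) :=
        (PySem.List.mem_dedup _ _).mpr hrF
      obtain ⟨u, v, huv⟩ := List.append_of_mem hrdF
      have hnduv : r ∉ u ++ v := by
        have hnd := PySem.List.nodup_dedup (L.filter (fun c => c ≠ 'J'))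
        rw [huv] at hnd
        exact (List.nodup_cons.mp (List.nodup_middle.mp hnd)).1
      -- B-side values as a multiset split at r
      have hpermF : (PySem.Dict.counter (L.filter (fun c => c ≠ 'J'))).values.Perm
          (((L.filter (fun c => c ≠ 'J')).count r : Int) ::
            (u ++ v).map (fun c => ((L.filter (fun c => c ≠ 'J')).count c : Int))) := by
        rw [pv_values_counter, huv, List.map_append, List.map_cons, List.map_append]
        exact List.perm_middle
      -- the sorted B-side values are nonempty
      obtain ⟨h0, t0, hsF⟩ : ∃ h0 t0,
          PySem.List.sorted (PySem.Dict.counter (L.filter (fun c => c ≠ 'J'))).values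
            (fun v => v) true = h0 :: t0 := by
        rcases hsx : PySem.List.sorted (PySem.Dict.counter (L.filter (fun c => c ≠ 'J'))).values
            (fun v => v) true with _ | ⟨h0, t0⟩
        · exfalso
          rw [PySem.List.sorted_eq_nil_iff, pv_values_counter, List.map_eq_nil_iff] at hsx
          have := hrdF
          rw [hsx] at this
          simp at this
        · exact ⟨_, _, rfl⟩
      -- the head of the sorted values is r's count
      have hmemv : ∀ w ∈ (PySem.Dict.counter (L.filter (fun c => c ≠ 'J'))).values,
          ∃ c ∈ PySem.List.dedup (L.filter (fun c => c ≠ 'J')),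
            w = ((L.filter (fun c => c ≠ 'J')).count c : Int) := by
        intro w hw
        rw [pv_values_counter] at hw
        obtain ⟨c, hc, rfl⟩ := List.mem_map.mp hw
        exact ⟨c, hc, rfl⟩
      have hbound : ∀ w ∈ (PySem.Dict.counter (L.filter (fun c => c ≠ 'J'))).values,
          w ≤ ((L.filter (fun c => c ≠ 'J')).count r : Int) := by
        intro w hw
        obtain ⟨c, hc, rfl⟩ := hmemv w hw
        have hcL : c ∈ L ∧ c ≠ 'J' := (hmemF c).mp ((PySem.List.mem_dedup _ _).mp hc)
        rw [hcF c hcL.2, hcF r hr_ne]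
        exact hr_max c ((PySem.List.mem_dedup _ _).mpr hcL.1) hcL.2
      have hh0 : h0 = ((L.filter (fun c => c ≠ 'J')).count r : Int) := by
        have hh0mem : h0 ∈ (PySem.Dict.counter (L.filter (fun c => c ≠ 'J'))).values := by
          have := (PySem.List.mem_sorted _ (fun v : Int => v) true h0).mp (by rw [hsF]; simp)
          exact this
        have h1 := hbound h0 hh0mem
        have h2 := PySem.List.key_head_sorted_rev_ge _ (fun v : Int => v) hsF _
          ((pv_values_counter _) ▸ List.mem_map.mpr ⟨r, hrdF, rfl⟩)
        exact le_antisymm h1 h2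
      -- the tail is the rest of the multiset
      have hpermT : ((u ++ v).map (fun c =>
          ((L.filter (fun c => c ≠ 'J')).count c : Int))).Perm t0 := by
        have h1 : (h0 :: t0).Perm
            (h0 :: (u ++ v).map (fun c => ((L.filter (fun c => c ≠ 'J')).count c : Int))) := by
          have h2 := (hsF ▸ PySem.List.sorted_perm _ _ _).trans hpermF
          rw [← hh0] at h2
          exact h2
        exact (h1.cons_inv).symm
      -- A-side values are the same multiset with r's count bumped by the joker count
      have hmemM : ∀ x, x ∈ L.map (fun x => if x = 'J' then r else x) ↔ x ∈ L ∧ x ≠ 'J' := by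
        intro x
        constructor
        · intro hx
          obtain ⟨y, hy, heq⟩ := List.mem_map.mp hx
          by_cases hyJ : y = 'J'
          · rw [hyJ] at heq; simp at heq; rw [← heq]; exact ⟨hrL, hr_ne⟩
          · rw [if_neg hyJ] at heq; rw [← heq]; exact ⟨hy, hyJ⟩
        · intro ⟨hxL, hxJ⟩
          exact List.mem_map.mpr ⟨x, hxL, if_neg hxJ⟩
      have hdedupMF : (PySem.List.dedup (L.map (fun x => if x = 'J' then r else x))).Perm
          (PySem.List.dedup (L.filter (fun c => c ≠ 'J'))) := by
        apply (List.perm_ext_iff_of_nodup (PySem.List.nodup_dedup _)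
          (PySem.List.nodup_dedup _)).mpr
        intro a
        rw [PySem.List.mem_dedup, PySem.List.mem_dedup, hmemM, hmemF]
      have hgood : ∀ c ∈ PySem.List.dedup (L.filter (fun c => c ≠ 'J')),
          ((L.map (fun x => if x = 'J' then r else x)).count c : Int) =
            ((L.filter (fun c => c ≠ 'J')).count c : Int) +
              (if c = r then (L.count 'J' : Int) else 0) := by
        intro c hc
        obtain ⟨hcL, hcJ⟩ := (hmemF c).mp ((PySem.List.mem_dedup _ _).mp hc)
        rw [pv_count_replace L r hr_ne c, if_neg hcJ]
        by_cases hcr : c = r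
        · rw [if_pos hcr, if_pos hcr, hcF c hcJ, hcr]
          push_cast; ring
        · rw [if_neg hcr, if_neg hcr, hcF c hcJ]
          ring
      have hvalsM : (PySem.Dict.counter (L.map (fun x => if x = 'J' then r else x))).values.Perm
          ((h0 + (L.count 'J' : Int)) :: t0) := by
        rw [pv_values_counter]
        refine (hdedupMF.map _).trans ?_
        rw [List.map_congr_left hgood]
        have hu : u.map (fun c => ((L.filter (fun c => c ≠ 'J')).count c : Int) +
            (if c = r then (L.count 'J' : Int) else 0)) =
            u.map (fun c => ((L.filter (fun c => c ≠ 'J')).count c : Int)) :=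
          List.map_congr_left (fun a ha => by
            rw [if_neg (fun h : a = r => hnduv (by rw [← h]; exact List.mem_append_left v ha))]; ring)
        have hv : v.map (fun c => ((L.filter (fun c => c ≠ 'J')).count c : Int) +
            (if c = r then (L.count 'J' : Int) else 0)) =
            v.map (fun c => ((L.filter (fun c => c ≠ 'J')).count c : Int)) :=
          List.map_congr_left (fun a ha => by
            rw [if_neg (fun h : a = r => hnduv (by rw [← h]; exact List.mem_append_right u ha))]; ring)
        rw [huv, List.map_append, List.map_cons, hu, hv, if_pos rfl, hh0]
        refine List.perm_middle.trans ?_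
        have hpermT' : (u.map (fun c => ((L.filter (fun c => c ≠ 'J')).count c : Int)) ++
            v.map (fun c => ((L.filter (fun c => c ≠ 'J')).count c : Int))).Perm t0 := by
          rw [← List.map_append]; exact hpermT
        exact hpermT'.cons _
      have hpairB : ((h0 + (L.count 'J' : Int)) :: t0).Pairwise (fun a b => b ≤ a) := by
        have hp := PySem.List.sorted_pairwise_rev
          (PySem.Dict.counter (L.filter (fun c => c ≠ 'J'))).values (fun v : Int => v)
        rw [hsF] at hp
        obtain ⟨hhead, htail⟩ := List.pairwise_cons.mp hp
        refine List.pairwise_cons.mpr ⟨?_, htail⟩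
        intro y hy
        have h1 : y ≤ h0 := hhead y hy
        have h2 : (0 : Int) ≤ (L.count 'J' : Int) := Int.natCast_nonneg _
        omega
      rw [hsF]
      show (h0 + (L.count 'J' : Int)) :: t0 = pvSigA L
      unfold pvSigA
      rw [hc2]
      exact (pv_sorted_rev_unique hvalsM.symm hpairB).symm

-- A's branch block produces the one-hot list matching the signature
-- one-hot rank lists and the positional power-of-16 weight of a list
def pvHot (t : Nat) : List Int := (List.replicate 7 0).set t 1

def pvHotO : Option Nat → List Int
  | some t => pvHot t
  | none => List.replicate 7 0

def pvW : List Int → Int → Int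
  | [], _ => 0
  | x :: t, e => x * 16 ^ e.toNat + pvW t (e - 1)

theorem pv_enumerate_cons {α : Type} (x : α) (t : List α) (s : Int) :
    PySem.List.enumerate (x :: t) s = (s, x) :: PySem.List.enumerate t (s + 1) := by
  simp [PySem.List.enumerate]

-- A's accumulation loop is the weight of the rank list
theorem pv_fold_enumA (xs : List Int) (s a C : Int) :
    (PySem.List.enumerate xs s).foldl (fun acc p => acc + p.2 * 16 ^ ((C - p.1).toNat)) a
      = a + pvW xs (C - s) := by
  induction xs generalizing s a with
  | nil => simp [PySem.List.enumerate, pvW]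
  | cons x t ih =>
    rw [pv_enumerate_cons, List.foldl_cons, ih]
    have : C - (s + 1) = C - s - 1 := by ring
    rw [this, pvW]
    ring

-- B's accumulation loop is the weight of the card-digit list
theorem pv_fold_enumB (xs : List Char) (s a C : Int) :
    (PySem.List.enumerate xs s).foldl
        (fun acc p => acc + pvCDict.getD p.2 0 * 16 ^ ((C - p.1).toNat)) a
      = a + pvW (xs.map (fun c => pvCDict.getD c 0)) (C - s) := by
  induction xs generalizing s a with
  | nil => simp [PySem.List.enumerate, pvW]
  | cons x t ih =>
    rw [pv_enumerate_cons, List.foldl_cons, ih]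
    have : C - (s + 1) = C - s - 1 := by ring
    rw [this, List.map_cons, pvW]
    ring

theorem pv_w_append (u w : List Int) (e : Int) :
    pvW (u ++ w) e = pvW u e + pvW w (e - u.length) := by
  induction u generalizing e with
  | nil => simp [pvW]
  | cons x t ih =>
    rw [List.cons_append, pvW, pvW, ih]
    have : e - 1 - (t.length : Int) = e - ((x :: t).length : Int) := by
      simp; ring
    rw [this]
    ring

theorem pv_typeindex_le (sig : List Int) (t : Nat) (h : pvTypeIndex sig = some t) : t ≤ 6 := by
  unfold pvTypeIndex at h
  split_ifs at h <;> simp_all <;> omega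

theorem pv_hot_w (t e : Nat) (ht : t ≤ 6) (he : 6 ≤ e) :
    pvW (pvHot t) (e : Int) = 16 ^ (e - t) := by
  interval_cases t <;>
    simp only [pvHot, List.replicate, List.set, pvW] <;>
    rw [show ((e : Nat) : Int).toNat = e from by omega] <;>
    (try rw [show ((e : Int) - 1).toNat = e - 1 from by omega]) <;>
    (try rw [show ((e : Int) - 1 - 1).toNat = e - 2 from by omega]) <;>
    (try rw [show ((e : Int) - 1 - 1 - 1).toNat = e - 3 from by omega]) <;>
    (try rw [show ((e : Int) - 1 - 1 - 1 - 1).toNat = e - 4 from by omega]) <;>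
    (try rw [show ((e : Int) - 1 - 1 - 1 - 1 - 1).toNat = e - 5 from by omega]) <;>
    (try rw [show ((e : Int) - 1 - 1 - 1 - 1 - 1 - 1).toNat = e - 6 from by omega]) <;>
    norm_num

theorem pv_zero_w (e : Int) : pvW (List.replicate 7 0) e = 0 := by
  simp [List.replicate, pvW]

theorem pv_sigA_def (L : List Char) :
    PySem.List.sorted (pvCounter2 L).values (fun v => v) true = pvSigA L := rfl

-- A's rank block computes the one-hot of B's type index of the signature
theorem pv_rank_eq (d : PySem.Dict Char Int) :
    pvRankA d = pvHotO (pvTypeIndex (PySem.List.sorted d.values (fun v => v) true)) := by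
  have hmap : (PySem.List.sorted d.items (fun p => p.2) true).map (fun p => p.2) =
      PySem.List.sorted d.values (fun v => v) true := pv_map_snd_sorted_items d
  have hsize : d.size = (PySem.List.sorted d.items (fun p => p.2) true).length := by
    rw [PySem.List.length_sorted]
    simp [PySem.Dict.size]
  unfold pvRankA
  rw [← hmap]
  set s := PySem.List.sorted d.items (fun p => p.2) true with hs
  clear_value s
  clear hmap hs
  rcases s with _ | ⟨q0, _ | ⟨q1, _ | ⟨q2, _ | ⟨q3, _ | ⟨q4, _ | ⟨q5, r⟩⟩⟩⟩⟩⟩ <;>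
    simp only [hsize, List.length_nil, List.length_cons, List.map_cons, List.map_nil] <;>
    norm_num [pvTypeIndex, pvHotO, pvHot]
  all_goals ((try split_ifs) <;>
    first
      | rfl
      | (exfalso; omega))

-- ===== VERDICT (by name: the statement is the Claim_ definition above) =====
theorem to_hex_code_spec : Claim_equal_to_hex_code := by
  unfold Claim_equal_to_hex_code
  intro s _hdom _hpre
  unfold Spec_to_hex_code
  have hsig := pv_sig_eq s.toList
  simp only [to_hex_code, to_hex_code_alt]
  rw [pv_rank_eq (pvCounter2 s.toList)]
  rcases hv : PySem.List.sorted
      (PySem.Dict.counter (s.toList.filter (fun c => c ≠ 'J'))).values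
      (fun v => v) true with _ | ⟨hh, tt⟩ <;>
    (try rw [hv] at hsig) <;>
    rw [hsig] <;>
    rw [pv_fold_enumA, pv_fold_enumB] <;>
    rw [pv_w_append]
  all_goals rw [pv_sigA_def]
  all_goals rcases hT : pvTypeIndex (pvSigA s.toList) with _ | t
  all_goals simp only [pvHotO]
  -- no recognised type: both totals are 0
  case nil.none | cons.none =>
    rw [pv_zero_w]
    rw [show ((List.replicate 7 (0:Int) ++
          List.map (fun c => pvCDict.getD c 0) s.toList).length : Int) - 1 -
          ((List.replicate 7 (0:Int)).length : Int)
        = (s.toList.length : Int) - 1 - 0 from by simp; ring]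
  -- a recognised type: t ≤ 6, the one-hot contributes 16^(n+6-t)
  case nil.some | cons.some =>
    have ht6 : t ≤ 6 := pv_typeindex_le _ _ hT
    rw [show ((pvHot t ++ List.map (fun c => pvCDict.getD c 0) s.toList).length : Int) - 1
        = ((s.toList.length + 6 : Nat) : Int) from by simp [pvHot]; ring]
    rw [pv_hot_w t (s.toList.length + 6) ht6 (by omega)]
    rw [show ((s.toList.length + 6 : Nat) : Int) - ((pvHot t).length : Int)
        = (s.toList.length : Int) - 1 - 0 from by simp [pvHot]; ring]
    ring
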